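-- pv_equiv track=rewrite | github.com/diascar/tableToPhylip | tableToPhylip.py | distribution_code
-- ===== SOURCE A (Python) =====
-- def distribution_code(areas_dict, list_areas):
--     '''
--     this function creates a dictionary with species names as keys and
--      codes for presence/absence in a specific area as values
--     '''
--     codeMatrix = {k:"" for k in areas_dict.keys()}
--
--     for area in list_areas:
--         for key in areas_dict.keys():
--             temp_list = []
--             for value in areas_dict[key]:
--                 mod_value = value.rstrip(",").lstrip(",").lower().rstrip().lstrip()
--                 temp_list.append(mod_value)
--             if area in temp_list:
--                 codeMatrix[key] = codeMatrix[key] + str(1)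
--             else:
--                 codeMatrix[key] = codeMatrix[key] + str(0)
--             temp_list = []
--
--     return codeMatrix
-- ===== SOURCE B (Python) =====
-- def distribution_code(areas_dict, list_areas):
--     '''
--     this function creates a dictionary with species names as keys and
--      codes for presence/absence in a specific area as values
--     '''
--     # index: area string -> all positions where it occurs in list_areas
--     index = {}
--     for i, area in enumerate(list_areas):
--         index.setdefault(area, []).append(i)
--
--     codeMatrix = {}
--     for key, values in areas_dict.items():
--         slots = ["0"] * len(list_areas)
--         for value in values:
--             mod_value = value.rstrip(",").lstrip(",").lower().rstrip().lstrip()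
--             for pos in index.get(mod_value, []):
--                 slots[pos] = "1"
--         codeMatrix[key] = "".join(slots)
--     return codeMatrix
-- ===== Notes on version B (the rewrite author's own statement) =====
-- stated objective: faster
-- what changed: Instead of re-normalizing every species' whole value list once per area inside a triply nested gather loop, B builds a position index of list_areas once, normalizes each value exactly once, and scatters '1's into a per-species slot array, joining it at the end.
import Mathlib
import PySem

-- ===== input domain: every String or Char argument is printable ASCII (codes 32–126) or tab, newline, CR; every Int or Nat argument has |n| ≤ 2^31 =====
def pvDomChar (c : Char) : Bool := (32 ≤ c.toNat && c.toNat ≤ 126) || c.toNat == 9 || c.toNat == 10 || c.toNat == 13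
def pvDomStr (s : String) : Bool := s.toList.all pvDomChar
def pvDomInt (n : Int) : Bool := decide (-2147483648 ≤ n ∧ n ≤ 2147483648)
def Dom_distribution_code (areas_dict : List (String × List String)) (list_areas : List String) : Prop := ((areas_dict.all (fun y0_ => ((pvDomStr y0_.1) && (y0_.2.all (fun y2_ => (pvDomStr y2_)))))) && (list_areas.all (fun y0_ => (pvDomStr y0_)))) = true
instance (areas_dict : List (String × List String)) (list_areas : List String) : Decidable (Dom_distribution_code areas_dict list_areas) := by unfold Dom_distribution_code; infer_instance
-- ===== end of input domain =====

-- B replaces A's per-area re-normalization and gather loop by a one-pass position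
-- index of list_areas and a scatter of '1's into per-species slot arrays (objective: faster).

-- ===== PORT A =====
-- v.rstrip(",") — hand port (PySem has only the both-sided stripChars); exact: drops trailing ','
def pyRstripComma (s : String) : String := String.ofList ((s.toList.reverse.dropWhile (· == ',')).reverse)
-- v.lstrip(",") — hand port; exact: drops leading ','
def pyLstripComma (s : String) : String := String.ofList (s.toList.dropWhile (· == ','))
-- value.rstrip(",").lstrip(",").lower().rstrip().lstrip() — shared by both ports (the identical expression appears in both Pythons)
def normVal (v : String) : String :=
  PySem.Str.lstrip (PySem.Str.rstrip (PySem.Str.lower (pyLstripComma (pyRstripComma v))))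

def distribution_code (areas_dict : List (String × List String)) (list_areas : List String) : List (String × String) :=
  let d := PySem.Dict.mk areas_dict
  -- codeMatrix = {k: "" for k in areas_dict.keys()}
  let codeMatrix := d.keys.foldl (fun m k => m.insert k "") PySem.Dict.empty
  let final := list_areas.foldl (fun m area =>
    d.keys.foldl (fun m key =>
      -- temp_list built value by value
      let temp_list := (d.getD key []).foldl (fun acc v => acc ++ [normVal v]) []
      if temp_list.contains area then
        m.insert key (m.getD key "" ++ PySem.Int.toStr 1)
      else
        m.insert key (m.getD key "" ++ PySem.Int.toStr 0)) m) codeMatrix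
  final.items

-- ===== PORT B =====
def distribution_code_alt (areas_dict : List (String × List String)) (list_areas : List String) : List (String × String) :=
  -- index = {}; for i, area in enumerate(list_areas): index.setdefault(area, []).append(i)
  let index := (PySem.List.enumerate list_areas 0).foldl
    (fun d p => d.modify p.2 [] (· ++ [p.1])) PySem.Dict.empty
  -- codeMatrix = {}; for key, values in areas_dict.items(): …
  let codeMatrix := areas_dict.foldl (fun r kv =>
    let slots := kv.2.foldl (fun slots v =>
      let mod := normVal v
      (index.getD mod []).foldl (fun slots pos => PySem.List.pySetD slots pos "1") slots)
      (PySem.List.pyRepeat ["0"] (PySem.List.len list_areas))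
    r.insert kv.1 (PySem.Str.join "" slots)) PySem.Dict.empty
  codeMatrix.items

-- ===== PRECONDITION & SPEC =====
-- Pre_ excludes association lists with duplicate keys: they do not represent any Python
-- dict (A's parameter is a dict, whose keys are unique), so A is never called on them.
def Pre_distribution_code (areas_dict : List (String × List String)) (list_areas : List String) : Prop :=
  (areas_dict.map Prod.fst).Nodup
instance (areas_dict : List (String × List String)) (list_areas : List String) : Decidable (Pre_distribution_code areas_dict list_areas) := by unfold Pre_distribution_code; infer_instance
def pvWitness_distribution_code : (List (String × List String)) × List String :=
  ([("sp1", ["A,", " b"]), ("sp2", ["c"])], ["a", "b", "a"])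
def Spec_distribution_code (areas_dict : List (String × List String)) (list_areas : List String) (out : List (String × String)) : Prop := out = distribution_code_alt areas_dict list_areas
instance (areas_dict : List (String × List String)) (list_areas : List String) (out : List (String × String)) : Decidable (Spec_distribution_code areas_dict list_areas out) := by unfold Spec_distribution_code; infer_instance

-- ===== CLAIM (what is proved, stated in full; the proofs are below) =====
def Claim_equal_distribution_code : Prop := ∀ (areas_dict : List (String × List String)) (list_areas : List String), Dom_distribution_code areas_dict list_areas → Pre_distribution_code areas_dict list_areas → Spec_distribution_code areas_dict list_areas (distribution_code areas_dict list_areas)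

-- ===== LEMMAS AND PROOFS =====


-- one bit of a species' code: presence of area a among the normalized values vs
def bitOf (vs : List String) (a : String) : String :=
  if (vs.map normVal).contains a then "1" else "0"

-- the positions of area a in list_areas (as B's index dict stores them)
def posIdx (list_areas : List String) (a : String) : List Int :=
  ((PySem.List.enumerate list_areas 0).filter (fun p => p.2 == a)).map (fun p => p.1)

theorem join_empty_cons (x : List Char) (xs : List (List Char)) :
    PySem.Chars.join [] (x :: xs) = x ++ PySem.Chars.join [] xs := by
  cases xs with
  | nil => rw [PySem.Chars.join_singleton, PySem.Chars.join_nil]; simp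
  | cons y ys => rw [PySem.Chars.join_cons_cons]; simp

theorem strjoin_empty_cons (x : String) (xs : List String) :
    PySem.Str.join "" (x :: xs) = x ++ PySem.Str.join "" xs := by
  apply String.toList_injective
  simp [PySem.Str.join, join_empty_cons]

-- a foldl appending one chunk per element is "" followed by a join of the chunks
theorem foldl_append_eq_join (l : List String) (f : String → String) (s0 : String) :
    l.foldl (fun s a => s ++ f a) s0 = s0 ++ PySem.Str.join "" (l.map f) := by
  induction l generalizing s0 with
  | nil =>
    apply String.toList_injective
    simp [PySem.Str.join, PySem.Chars.join_nil]
  | cons x xs ih =>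
    rw [List.foldl_cons, ih, List.map_cons, strjoin_empty_cons]
    apply String.toList_injective
    simp

-- the dict {k: "" for k in ks} answers "" to every getD _ ""
theorem getD_init_empty (ks : List String) (m : PySem.Dict String String)
    (hm : ∀ k, m.getD k "" = "") (k : String) :
    (ks.foldl (fun m k => m.insert k "") m).getD k "" = "" := by
  induction ks generalizing m with
  | nil => exact hm k
  | cons x xs ih =>
    refine ih _ (fun k' => ?_)
    rw [PySem.Dict.getD_insert]
    split <;> [rfl; exact hm k']

-- A's inner loop over the (distinct) keys: every key's string grows by its bit
theorem inner_fold_spec (ks : List String) (b : String → String)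
    (m : PySem.Dict String String) (hnd : ks.Nodup)
    (hks : ∀ k ∈ ks, m.contains k = true) :
    (ks.foldl (fun m key => m.insert key (m.getD key "" ++ b key)) m).keys = m.keys ∧
    ∀ k, (ks.foldl (fun m key => m.insert key (m.getD key "" ++ b key)) m).getD k "" =
      if k ∈ ks then m.getD k "" ++ b k else m.getD k "" := by
  induction ks generalizing m with
  | nil => simp
  | cons x xs ih =>
    have hx : m.contains x = true := hks x (by simp)
    have hnd' : xs.Nodup := hnd.of_cons
    have hxnot : x ∉ xs := (List.nodup_cons.mp hnd).1
    have hks' : ∀ k ∈ xs, (m.insert x (m.getD x "" ++ b x)).contains k = true := by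
      intro k hk
      rw [PySem.Dict.contains_insert]
      simp [hks k (List.mem_cons_of_mem _ hk)]
    obtain ⟨ihk, ihg⟩ := ih _ hnd' hks'
    constructor
    · rw [List.foldl_cons, ihk, PySem.Dict.keys_insert_of_contains _ _ hx]
    · intro k
      rw [List.foldl_cons, ihg k, PySem.Dict.getD_insert]
      by_cases hk : k ∈ xs
      · have : k ≠ x := fun h => hxnot (h ▸ hk)
        simp [hk, this]
      · by_cases hkx : k = x
        · subst hkx; simp [hk]
        · simp [hk, hkx]

-- A's outer loop over the areas
theorem outer_fold_spec (areas : List String) (ks : List String)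
    (bf : String → String → String) (m : PySem.Dict String String)
    (hnd : ks.Nodup) (hkeys : m.keys = ks) :
    (areas.foldl (fun m area =>
        ks.foldl (fun m key => m.insert key (m.getD key "" ++ bf area key)) m) m).keys = ks ∧
    ∀ k ∈ ks, (areas.foldl (fun m area =>
        ks.foldl (fun m key => m.insert key (m.getD key "" ++ bf area key)) m) m).getD k "" =
      areas.foldl (fun s a => s ++ bf a k) (m.getD k "") := by
  induction areas generalizing m with
  | nil => exact ⟨hkeys, fun k _ => rfl⟩
  | cons a as ih =>
    have hcont : ∀ k ∈ ks, m.contains k = true := by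
      intro k hk
      rw [PySem.Dict.contains_iff_mem_keys, hkeys]
      exact hk
    obtain ⟨h1, h2⟩ := inner_fold_spec ks (bf a) m hnd hcont
    obtain ⟨ih1, ih2⟩ := ih _ (h1.trans hkeys)
    refine ⟨ih1, fun k hk => ?_⟩
    rw [List.foldl_cons, ih2 k hk, h2 k, if_pos hk, List.foldl_cons]

-- B's index dict stores, for each area, the list of its positions in list_areas
theorem index_getD (list_areas : List String) (a : String) :
    ((PySem.List.enumerate list_areas 0).foldl
      (fun d p => d.modify p.2 [] (· ++ [p.1])) PySem.Dict.empty).getD a [] =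
    posIdx list_areas a := by
  have h := PySem.Dict.getD_foldl_modify_append
    ((PySem.List.enumerate list_areas 0).map (fun p => (p.2, p.1)))
    (PySem.Dict.empty : PySem.Dict String (List Int)) a
  rw [List.foldl_map] at h
  simpa [posIdx, List.filter_map, Function.comp_def, List.map_map] using h

-- membership in the position list
theorem mem_posIdx (list_areas : List String) (a : String) (j : Int) :
    j ∈ posIdx list_areas a ↔
      ∃ (k : Nat) (h : k < list_areas.length), j = (k : Int) ∧ list_areas[k] = a := by
  simp only [posIdx, List.mem_map, List.mem_filter, PySem.List.mem_enumerate_iff]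
  constructor
  · rintro ⟨p, ⟨⟨k, hk, rfl⟩, hpa⟩, rfl⟩
    exact ⟨k, hk, by simpa using hpa.symm ▸ rfl, by simpa using hpa⟩
  · rintro ⟨k, hk, rfl, hka⟩
    exact ⟨((k : Int), list_areas[k]), ⟨⟨k, hk, by simp⟩, by simpa using hka⟩, rfl⟩

theorem posIdx_bounds (list_areas : List String) (a : String) (j : Int)
    (hj : j ∈ posIdx list_areas a) : 0 ≤ j ∧ j.toNat < list_areas.length := by
  obtain ⟨k, hk, rfl, -⟩ := (mem_posIdx list_areas a j).mp hj
  simp [hk]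

-- scattering "1" over a list of positions, elementwise
theorem scatter_getElem (P : List Int) (sl : List String)
    (hP : ∀ p ∈ P, 0 ≤ p ∧ p.toNat < sl.length) :
    ∀ (i : Nat),
      (P.foldl (fun sl pos => PySem.List.pySetD sl pos "1") sl)[i]? =
        if (i : Int) ∈ P then some "1" else sl[i]? := by
  induction P generalizing sl with
  | nil => simp
  | cons p ps ih =>
    intro i
    obtain ⟨hp0, hplt⟩ := hP p (by simp)
    have hset : PySem.List.pySetD sl p "1" = sl.set p.toNat "1" :=
      PySem.List.pySetD_of_nonneg sl "1" hp0
    have hlen : (sl.set p.toNat "1").length = sl.length := by simp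
    have hP' : ∀ q ∈ ps, 0 ≤ q ∧ q.toNat < (sl.set p.toNat "1").length := by
      intro q hq; rw [hlen]; exact hP q (by simp [hq])
    rw [List.foldl_cons, hset, ih _ hP', List.getElem?_set]
    by_cases hips : (i : Int) ∈ ps
    · simp [hips]
    · by_cases hip : (i : Int) = p
      · have h1 : p.toNat = i := by omega
        simp [hip, h1]
        omega
      · have h1 : p.toNat ≠ i := by omega
        simp [hips, hip, h1]

-- the slot list whose i-th entry says whether Q holds of the i-th area
def maskP (la : List String) (Q : String → Bool) : List String :=
  la.map (fun a => if Q a then "1" else "0")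

-- scattering the positions of v turns maskP Q into maskP (· == v || Q ·)
theorem scatter_mask (la : List String) (v : String) (Q : String → Bool) :
    (posIdx la v).foldl (fun sl pos => PySem.List.pySetD sl pos "1") (maskP la Q)
      = maskP la (fun a => a == v || Q a) := by
  apply List.ext_getElem?
  intro i
  rw [scatter_getElem _ _ (fun p hp => by
    simpa [maskP] using posIdx_bounds la v p hp)]
  by_cases hi : i < la.length
  · have hmem : ((i : Int) ∈ posIdx la v) ↔ la[i] = v := by
      rw [mem_posIdx]
      constructor
      · rintro ⟨k, hk, hik, hkv⟩
        have : k = i := by omega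
        subst this; exact hkv
      · intro h; exact ⟨i, hi, rfl, h⟩
    by_cases hv : la[i] = v
    · simp [maskP, hmem, hv, hi]
    · have : ¬ ((i : Int) ∈ posIdx la v) := by rw [hmem]; exact hv
      simp [maskP, this, hi, hv]
  · have : ¬ ((i : Int) ∈ posIdx la v) := fun h => by
      have := posIdx_bounds la v _ h; omega
    simp [maskP, this, List.getElem?_eq_none (by simpa using Nat.le_of_not_lt hi)]

theorem maskP_congr (la : List String) {Q Q' : String → Bool} (h : ∀ a, Q a = Q' a) :
    maskP la Q = maskP la Q' :=
  List.map_congr_left (fun a _ => by rw [h])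

-- B's loop over one species' values, starting from any mask
theorem values_fold (la : List String) (vs : List String) (Q : String → Bool) :
    vs.foldl (fun sl v =>
        (((PySem.List.enumerate la 0).foldl
            (fun d p => d.modify p.2 [] (· ++ [p.1])) PySem.Dict.empty).getD (normVal v) []).foldl
          (fun sl pos => PySem.List.pySetD sl pos "1") sl) (maskP la Q)
      = maskP la (fun a => (vs.map normVal).contains a || Q a) := by
  induction vs generalizing Q with
  | nil => simp [maskP]
  | cons v vs ih =>
    rw [List.foldl_cons, index_getD, scatter_mask, ih]
    apply maskP_congr
    intro a
    cases h1 : (a == normVal v) <;> cases h2 : (List.map normVal vs).contains a <;>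
      simp only [List.map_cons, List.contains_cons, h1, h2, Bool.false_or, Bool.true_or,
        Bool.or_false, Bool.or_true]

-- ===== VERDICT (by name: the statement is the Claim_ definition above) =====
theorem distribution_code_spec : Claim_equal_distribution_code := by
  intro ad la hdom hpre
  unfold Spec_distribution_code
  have hks : (PySem.Dict.mk ad).keys = ad.map Prod.fst := by
    simpa using PySem.Dict.keys_mk ad
  have hnd : (PySem.Dict.mk ad).keys.Nodup := by rw [hks]; exact hpre
  -- ---- A's side ----
  have hm0keys :
      ((PySem.Dict.mk ad).keys.foldl (fun m k => m.insert k "") PySem.Dict.empty).keys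
        = (PySem.Dict.mk ad).keys := by
    rw [PySem.Dict.keys_foldl_insert]
    have he : (PySem.Dict.empty : PySem.Dict String String).keys = [] := rfl
    rw [he, PySem.Set.update_eq_append_of_disjoint [] _ hnd (by simp)]
    simp
  have hfun : (fun (m : PySem.Dict String String) area =>
      (PySem.Dict.mk ad).keys.foldl (fun m key =>
        let temp_list := ((PySem.Dict.mk ad).getD key []).foldl (fun acc v => acc ++ [normVal v]) []
        if temp_list.contains area then
          m.insert key (m.getD key "" ++ PySem.Int.toStr 1)
        else
          m.insert key (m.getD key "" ++ PySem.Int.toStr 0)) m)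
      = (fun (m : PySem.Dict String String) area =>
      (PySem.Dict.mk ad).keys.foldl (fun m key =>
        m.insert key (m.getD key "" ++ bitOf ((PySem.Dict.mk ad).getD key []) area)) m) := by
    funext m area
    congr 1
    funext m' key
    show (if ((((PySem.Dict.mk ad).getD key []).foldl (fun acc v => acc ++ [normVal v]) []).contains area) then
        m'.insert key (m'.getD key "" ++ PySem.Int.toStr 1)
      else m'.insert key (m'.getD key "" ++ PySem.Int.toStr 0)) = _
    rw [PySem.List.foldl_append_singleton_eq_map, List.nil_append]
    unfold bitOf
    by_cases h : (((PySem.Dict.mk ad).getD key []).map normVal).contains area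
    · rw [if_pos h, if_pos h]; rfl
    · rw [if_neg h, if_neg h]; rfl
  obtain ⟨hk, hg⟩ := outer_fold_spec la (PySem.Dict.mk ad).keys
    (fun a k => bitOf ((PySem.Dict.mk ad).getD k []) a)
    ((PySem.Dict.mk ad).keys.foldl (fun m k => m.insert k "") PySem.Dict.empty) hnd hm0keys
  have hA : distribution_code ad la =
      (PySem.Dict.mk ad).keys.map (fun k =>
        (k, PySem.Str.join "" (la.map (bitOf ((PySem.Dict.mk ad).getD k []))))) := by
    unfold distribution_code
    dsimp only
    rw [hfun]
    rw [PySem.Dict.items_eq_map_keys _ (by rw [hk]; exact hnd) ""]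
    rw [hk]
    refine List.map_congr_left (fun k hkmem => ?_)
    rw [hg k hkmem, getD_init_empty _ _ (fun k' => rfl), foldl_append_eq_join]
    refine congrArg _ ?_
    apply String.toList_injective
    simp
  -- ---- B's side ----
  have hB : distribution_code_alt ad la =
      ad.map (fun kv => (kv.1, PySem.Str.join "" (la.map (bitOf kv.2)))) := by
    unfold distribution_code_alt
    dsimp only
    rw [PySem.Dict.items_foldl_insert_fresh ad (fun kv => kv.1)
      (fun kv => PySem.Str.join "" (kv.2.foldl (fun slots v =>
        ((((PySem.List.enumerate la 0).foldl
            (fun d p => d.modify p.2 [] (· ++ [p.1])) PySem.Dict.empty).getD (normVal v) []).foldl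
          (fun slots pos => PySem.List.pySetD slots pos "1") slots))
        (PySem.List.pyRepeat ["0"] (PySem.List.len la))))
      PySem.Dict.empty (fun a _ => rfl) hpre]
    have he : (PySem.Dict.empty : PySem.Dict String String).items = [] := rfl
    rw [he, List.nil_append]
    refine List.map_congr_left (fun kv _ => ?_)
    have hinit : PySem.List.pyRepeat ["0"] (PySem.List.len la) = maskP la (fun _ => false) := by
      rw [PySem.List.pyRepeat_singleton]
      simp [maskP, PySem.List.len, List.map_const']
    rw [hinit, values_fold la kv.2 (fun _ => false)]
    refine congrArg _ (congrArg _ ?_)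
    rw [maskP_congr la (fun a => Bool.or_false _)]
    rfl
  rw [hA, hB, hks, List.map_map]
  refine List.map_congr_left (fun kv hkv => ?_)
  have hmem : (kv.1, kv.2) ∈ (PySem.Dict.mk ad).items := by simpa using hkv
  have := PySem.Dict.getD_of_mem_items (PySem.Dict.mk ad) hmem hnd ([] : List String)
  simp [Function.comp, this]
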